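-- pv_equiv track=rewrite | github.com/Fyxexe/OCHO-3C | decrypt.py | sorting_for_decrypt_steep1
-- ===== SOURCE A (Python) =====
-- def sorting_for_decrypt_steep1(tokenText, n):
--     decrypted_text = [x[:] for x in tokenText]
--     for i in range(len(decrypted_text)):
--         for j in range(len(decrypted_text[i]) - n):
--             temp = decrypted_text[i][j]
--             decrypted_text[i][j] = decrypted_text[i][j + n]
--             decrypted_text[i][j + n] = temp
--     return decrypted_text
-- ===== SOURCE B (Python) =====
-- def sorting_for_decrypt_steep1(tokenText, n):
--     out = []
--     for row in tokenText:
--         L = len(row)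
--         if 1 <= n < L:
--             out.append(row[n:] + [row[j % n] for j in range(L - n, L)])
--         else:
--             out.append(row[:])
--     return out
-- ===== Notes on version B (the rewrite author's own statement) =====
-- stated objective: alternative
-- what changed: Replaces A's in-place sequential stride-n swap loop per row by a closed-form construction: the result row is row[n:] followed by the wrapped elements row[j % n] for the last n positions, with no mutation.
-- outside the precondition, e.g. on sorting_for_decrypt_steep1([['a', 'b']], -1): A raises IndexError, B returns [['a', 'b']]
import Mathlib
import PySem

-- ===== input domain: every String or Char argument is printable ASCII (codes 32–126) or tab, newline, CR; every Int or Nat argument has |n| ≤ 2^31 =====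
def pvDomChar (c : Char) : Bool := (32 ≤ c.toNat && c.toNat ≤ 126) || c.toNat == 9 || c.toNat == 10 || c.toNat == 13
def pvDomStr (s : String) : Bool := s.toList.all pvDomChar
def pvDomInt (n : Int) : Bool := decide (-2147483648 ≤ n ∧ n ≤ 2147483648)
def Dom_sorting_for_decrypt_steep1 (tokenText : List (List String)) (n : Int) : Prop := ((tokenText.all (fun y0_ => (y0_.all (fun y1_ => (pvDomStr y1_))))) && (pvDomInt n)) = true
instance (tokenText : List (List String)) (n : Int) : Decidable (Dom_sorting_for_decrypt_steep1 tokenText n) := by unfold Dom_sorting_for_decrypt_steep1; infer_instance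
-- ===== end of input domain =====

-- B builds each output row in closed form (tail slice + wrapped prefix) instead of A's in-place stride-n swap loop; alternative decomposition, same cost.


-- ===== PORT A =====
-- temp = row[j]; row[j] = row[j+n]; row[j+n] = temp  (all indices are in range on Pre_; pyGetD/pySetD are the total forms)
def pvSwapA (n : Int) (row : List String) (j : Int) : List String :=
  let temp := PySem.List.pyGetD row j ""
  PySem.List.pySetD (PySem.List.pySetD row j (PySem.List.pyGetD row (j + n) "")) (j + n) temp

def sorting_for_decrypt_steep1 (tokenText : List (List String)) (n : Int) : List (List String) :=
  tokenText.map (fun row =>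
    (PySem.List.pyRange 0 ((row.length : Int) - n) 1).foldl (pvSwapA n) row)

-- ===== PORT B =====
-- row[n:] + [row[j % n] for j in range(L - n, L)] when 1 <= n < L, else a copy of the row
def pvRowB (n : Int) (row : List String) : List String :=
  if 1 ≤ n ∧ n < (row.length : Int) then
    PySem.List.slice row (some n) none ++
      (PySem.List.pyRange ((row.length : Int) - n) (row.length : Int) 1).map
        (fun j => PySem.List.pyGetD row (PySem.Int.mod j n) "")
  else row

def sorting_for_decrypt_steep1_alt (tokenText : List (List String)) (n : Int) : List (List String) :=
  tokenText.map (fun row => pvRowB n row)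

-- ===== PRECONDITION & SPEC =====
-- Pre_ excludes only the inputs on which Python A raises IndexError: a negative n with a nonempty tokenText (the inner loop then indexes past the end of the row).
def Pre_sorting_for_decrypt_steep1 (tokenText : List (List String)) (n : Int) : Prop :=
  0 ≤ n ∨ tokenText = []
instance (tokenText : List (List String)) (n : Int) : Decidable (Pre_sorting_for_decrypt_steep1 tokenText n) := by unfold Pre_sorting_for_decrypt_steep1; infer_instance

def pvWitness_sorting_for_decrypt_steep1 : List (List String) × Int := ([["a", "b", "c"]], 1)

def Spec_sorting_for_decrypt_steep1 (tokenText : List (List String)) (n : Int) (out : List (List String)) : Prop := out = sorting_for_decrypt_steep1_alt tokenText n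
instance (tokenText : List (List String)) (n : Int) (out : List (List String)) : Decidable (Spec_sorting_for_decrypt_steep1 tokenText n out) := by unfold Spec_sorting_for_decrypt_steep1; infer_instance

-- ===== CLAIM (what is proved, stated in full; the proofs are below) =====
def Claim_equal_sorting_for_decrypt_steep1 : Prop := ∀ (tokenText : List (List String)) (n : Int), Dom_sorting_for_decrypt_steep1 tokenText n → Pre_sorting_for_decrypt_steep1 tokenText n → Spec_sorting_for_decrypt_steep1 tokenText n (sorting_for_decrypt_steep1 tokenText n)

-- ===== LEMMAS AND PROOFS =====

-- n = 0: each swap is the identity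
lemma pvSwapA_zero (s : List String) (j : Int) (hj : 0 ≤ j) : pvSwapA 0 s j = s := by
  obtain ⟨k, rfl⟩ : ∃ k : Nat, j = (k : Int) := ⟨j.toNat, (Int.toNat_of_nonneg hj).symm⟩
  simp only [pvSwapA, add_zero, PySem.List.pyGetD_natCast, PySem.List.pySetD_natCast,
    List.set_set]
  rcases Nat.lt_or_ge k s.length with h | h
  · rw [List.getD_eq_getElem _ _ h]; exact List.set_getElem_self h
  · exact List.set_eq_of_length_le h

lemma pvFoldl_swapA_zero (l : List Int) (h : ∀ j ∈ l, 0 ≤ j) (s : List String) :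
    l.foldl (pvSwapA 0) s = s := by
  induction l generalizing s with
  | nil => rfl
  | cons a t ih =>
    rw [List.foldl_cons, pvSwapA_zero s a (h a (by simp)), ih (fun j hj => h j (by simp [hj]))]

-- Nat-level model of one swap step, and the state of the row after k steps
def pvStepN (m : Nat) (row : List String) (k : Nat) : List String :=
  (row.set k (row.getD (k + m) "")).set (k + m) (row.getD k "")

def pvTarget (row : List String) (m k : Nat) : List String :=
  (List.range row.length).map (fun p =>
    if p < k then row.getD (p + m) ""
    else if p < k + m then row.getD (p % m) ""
    else row.getD p "")

lemma pvSwapA_bridge (m : Nat) (s : List String) (k : Nat) :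
    pvSwapA (m : Int) s (k : Int) = pvStepN m s k := by
  simp only [pvSwapA, pvStepN, ← Nat.cast_add, PySem.List.pyGetD_natCast,
    PySem.List.pySetD_natCast]

lemma pvMap_getD (row : List String) : (List.range row.length).map (fun p => row.getD p "") = row := by
  apply List.ext_getElem (by simp)
  intro i h1 h2
  simp [List.getElem?_eq_getElem h2]

lemma pvTarget_zero (row : List String) (m : Nat) : pvTarget row m 0 = row := by
  unfold pvTarget
  have : ∀ p ∈ List.range row.length,
      (if p < 0 then row.getD (p + m) "" else if p < 0 + m then row.getD (p % m) "" else row.getD p "")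
        = row.getD p "" := by
    intro p _
    split_ifs with h1 h2
    · omega
    · rw [Nat.mod_eq_of_lt (by omega)]
    · rfl
  rw [List.map_congr_left this, pvMap_getD]

lemma pvTarget_length (row : List String) (m k : Nat) : (pvTarget row m k).length = row.length := by
  simp [pvTarget]

lemma pvTarget_getD (row : List String) (m k i : Nat) (hi : i < row.length) :
    (pvTarget row m k).getD i "" =
      (if i < k then row.getD (i + m) "" else if i < k + m then row.getD (i % m) "" else row.getD i "") :=
  PySem.List.getD_map_range _ _ i "" hi

lemma pvStep_target (row : List String) (m k : Nat) (hm : 1 ≤ m) (h : k + m < row.length) :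
    pvStepN m (pvTarget row m k) k = pvTarget row m (k + 1) := by
  unfold pvStepN
  apply List.ext_getElem (by simp [pvTarget])
  intro p hp1 hp2
  have hpr : p < row.length := by
    simpa [pvTarget_length] using hp2
  rw [List.getElem_set, List.getElem_set]
  simp only [pvTarget_getD row m k k (by omega), pvTarget_getD row m k (k + m) (by omega)]
  have hrhs : (pvTarget row m (k+1))[p]'hp2 =
      (if p < k + 1 then row.getD (p + m) "" else if p < k + 1 + m then row.getD (p % m) "" else row.getD p "") := by
    simp [pvTarget]
  rw [hrhs]
  have hlhs : (pvTarget row m k)[p]'(by rw [pvTarget_length]; exact hpr) =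
      (if p < k then row.getD (p + m) "" else if p < k + m then row.getD (p % m) "" else row.getD p "") := by
    simp [pvTarget]
  rw [hlhs]
  by_cases h1 : p = k + m
  · subst h1
    simp only [Nat.add_mod_right]
    rw [if_neg (by omega : ¬ k + m < k + 1), if_pos (by omega : k + m < k + 1 + m)]
    split_ifs <;> first | rfl | omega
  · rw [if_neg (by omega : ¬ k + m = p)]
    by_cases h2 : p = k
    · subst h2
      rw [if_pos rfl, if_neg (by omega), if_neg (by omega), if_pos (by omega)]
    · rw [if_neg (by omega : ¬ k = p)]
      split_ifs <;> first | rfl | omega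

lemma pvFold_inv (row : List String) (m : Nat) (hm : 1 ≤ m) :
    ∀ k, k + m ≤ row.length → (List.range k).foldl (pvStepN m) row = pvTarget row m k := by
  intro k
  induction k with
  | zero => intro _; rw [List.range_zero, List.foldl_nil, pvTarget_zero]
  | succ k ih =>
    intro hk
    rw [List.range_succ, List.foldl_append, List.foldl_cons, List.foldl_nil,
      ih (by omega), pvStep_target row m k hm (by omega)]

lemma pvTarget_final (row : List String) (m : Nat) (_hm1 : 1 ≤ m) (hmL : m < row.length) :
    pvTarget row m (row.length - m) =
      row.drop m ++ (List.range m).map (fun k => row.getD ((row.length - m + k) % m) "") := by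
  apply List.ext_getElem (by simp [pvTarget_length]; omega)
  intro i h1 h2
  have hiL : i < row.length := by simpa [pvTarget_length] using h1
  have hlhs : (pvTarget row m (row.length - m))[i]'h1 =
      (if i < row.length - m then row.getD (i + m) ""
       else if i < row.length - m + m then row.getD (i % m) "" else row.getD i "") := by
    simp [pvTarget]
  rw [hlhs]
  by_cases hi : i < row.length - m
  · rw [if_pos hi, List.getElem_append_left (by simpa using hi), List.getElem_drop,
      List.getD_eq_getElem?_getD, List.getElem?_eq_getElem (by omega : i + m < row.length),
      Option.getD_some]
    congr 1
    omega
  · rw [if_neg hi, if_pos (by omega),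
      List.getElem_append_right (by simpa using hi)]
    simp only [List.getElem_map, List.getElem_range, List.length_drop]
    rw [show row.length - m + (i - (row.length - m)) = i from by omega]

lemma pvRowB_eq (row : List String) (m : Nat) (hm1 : 1 ≤ m) (hmL : m < row.length) :
    pvRowB (m : Int) row =
      row.drop m ++ (List.range m).map (fun k => row.getD ((row.length - m + k) % m) "") := by
  unfold pvRowB
  rw [if_pos ⟨by exact_mod_cast hm1, by exact_mod_cast hmL⟩]
  congr 1
  · rw [PySem.List.slice_from_natCast]
  · rw [PySem.List.pyRange_one, List.map_map]
    have hlen : (((row.length : Int)) - ((row.length : Int) - (m : Int))).toNat = m := by omega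
    rw [hlen]
    apply List.map_congr_left
    intro k hk
    have hk' : k < m := by simpa using hk
    have hidx : (row.length : Int) - (m : Int) + (k : Int) = ((row.length - m + k : Nat) : Int) := by
      push_cast [Nat.sub_add_cancel]
      omega
    simp only [Function.comp_apply, hidx, PySem.Int.mod_natCast, PySem.List.pyGetD_natCast]

lemma pvFoldA_eq_foldN (m : Nat) (l : List Nat) (s : List String) :
    l.foldl (fun x (y : Nat) => pvSwapA (m : Int) x ((y : Int))) s = l.foldl (pvStepN m) s := by
  induction l generalizing s with
  | nil => rfl
  | cons a t ih => rw [List.foldl_cons, List.foldl_cons, pvSwapA_bridge, ih]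

lemma pvRow_eq (row : List String) (n : Int) (hn : 0 ≤ n) :
    (PySem.List.pyRange 0 ((row.length : Int) - n) 1).foldl (pvSwapA n) row = pvRowB n row := by
  by_cases hc : 1 ≤ n ∧ n < (row.length : Int)
  · obtain ⟨m, rfl⟩ : ∃ m : Nat, n = (m : Int) := ⟨n.toNat, (Int.toNat_of_nonneg hn).symm⟩
    have hm1 : 1 ≤ m := by exact_mod_cast hc.1
    have hmL : m < row.length := by exact_mod_cast hc.2
    have hlen : (((row.length : Int) - (m : Int)) - 0).toNat = row.length - m := by omega
    rw [PySem.List.pyRange_one, hlen, List.foldl_map]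
    simp only [zero_add]
    rw [pvFoldA_eq_foldN, pvFold_inv row m hm1 _ (by omega), pvTarget_final row m hm1 hmL,
      ← pvRowB_eq row m hm1 hmL]
  · have hB : pvRowB n row = row := by unfold pvRowB; rw [if_neg hc]
    rw [hB]
    rcases (by omega : n = 0 ∨ (row.length : Int) ≤ n) with rfl | hL
    · apply pvFoldl_swapA_zero
      intro j hj
      exact ((PySem.List.mem_pyRange_one).1 hj).1
    · rw [PySem.List.pyRange_one_eq_nil (by omega)]
      rfl

-- ===== VERDICT (by name: the statement is the Claim_ definition above) =====
theorem sorting_for_decrypt_steep1_spec : Claim_equal_sorting_for_decrypt_steep1 := by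
  intro tokenText n _ hpre
  unfold Spec_sorting_for_decrypt_steep1 sorting_for_decrypt_steep1 sorting_for_decrypt_steep1_alt
  rcases hpre with hn | rfl
  · exact List.map_congr_left fun row _ => pvRow_eq row n hn
  · rfl
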